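-- pv_equiv track=rewrite | github.com/ferraric/Computational-Intelligence-Lab-2020 | rules/apply_rules.py | get_subsets_rule_based
-- ===== SOURCE A (Python) =====
-- from typing import List, Tuple
--
-- def get_subsets_rule_based(
--     rule_predictions: List[int], bert_predictions: List[int], labels: List[int]
-- ) -> Tuple[List[int], List[int], List[int]]:
--     rule_predictions_rule_matched = []
--     bert_predictions_rule_matched = []
--     labels_rule_matched = []
--     for x, y, z in zip(rule_predictions, bert_predictions, labels):
--         if x != 0:
--             rule_predictions_rule_matched.append(x)
--             bert_predictions_rule_matched.append(y)
--             labels_rule_matched.append(z)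
--     return (
--         rule_predictions_rule_matched,
--         bert_predictions_rule_matched,
--         labels_rule_matched,
--     )
-- ===== SOURCE B (Python) =====
-- from typing import List, Tuple
--
-- def get_subsets_rule_based(
--     rule_predictions: List[int], bert_predictions: List[int], labels: List[int]
-- ) -> Tuple[List[int], List[int], List[int]]:
--     n = min(len(rule_predictions), len(bert_predictions), len(labels))
--     idx = [i for i in range(n) if rule_predictions[i] != 0]
--     return (
--         [rule_predictions[i] for i in idx],
--         [bert_predictions[i] for i in idx],
--         [labels[i] for i in idx],
--     )
-- ===== Notes on version B (the rewrite author's own statement) =====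
-- stated objective: alternative
-- what changed: Replaces the interleaved zip-filter loop with three accumulators by first building an index table of matching positions (clamped to the shortest length) and then producing each output list by a separate indexing pass.
import Mathlib
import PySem

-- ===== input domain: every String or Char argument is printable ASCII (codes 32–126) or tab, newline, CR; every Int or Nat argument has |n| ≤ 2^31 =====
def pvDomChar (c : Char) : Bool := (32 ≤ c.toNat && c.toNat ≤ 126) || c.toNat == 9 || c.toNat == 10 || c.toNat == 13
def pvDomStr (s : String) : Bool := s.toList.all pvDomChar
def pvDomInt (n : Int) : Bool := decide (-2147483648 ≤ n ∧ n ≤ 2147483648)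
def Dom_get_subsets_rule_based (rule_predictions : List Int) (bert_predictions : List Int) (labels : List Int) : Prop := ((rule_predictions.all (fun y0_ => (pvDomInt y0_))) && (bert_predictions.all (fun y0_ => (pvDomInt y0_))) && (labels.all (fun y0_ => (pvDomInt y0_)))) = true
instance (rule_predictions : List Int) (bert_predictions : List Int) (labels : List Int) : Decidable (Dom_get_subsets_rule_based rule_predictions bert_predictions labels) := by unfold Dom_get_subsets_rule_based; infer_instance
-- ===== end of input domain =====

-- B builds an index table of matching positions first, then fills the three output
-- lists by separate indexing passes (objective: alternative decomposition, same cost).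

-- ===== PORT A =====
-- zip-filter loop with three growing accumulators, as in A
def get_subsets_rule_based (rule_predictions : List Int) (bert_predictions : List Int) (labels : List Int) : List Int × List Int × List Int :=
  (rule_predictions.zip (bert_predictions.zip labels)).foldl
    (fun acc t =>
      if t.1 ≠ 0 then (acc.1 ++ [t.1], acc.2.1 ++ [t.2.1], acc.2.2 ++ [t.2.2])
      else acc)
    ([], [], [])

-- ===== PORT B =====
-- index table first, then three indexing passes; indices are always in range, so getD is exact
def get_subsets_rule_based_alt (rule_predictions : List Int) (bert_predictions : List Int) (labels : List Int) : List Int × List Int × List Int :=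
  let n := min (min rule_predictions.length bert_predictions.length) labels.length
  let idx := (List.range n).filter (fun i => rule_predictions.getD i 0 != 0)
  (idx.map (fun i => rule_predictions.getD i 0),
   idx.map (fun i => bert_predictions.getD i 0),
   idx.map (fun i => labels.getD i 0))

-- ===== PRECONDITION & SPEC =====
def Spec_get_subsets_rule_based (rule_predictions : List Int) (bert_predictions : List Int) (labels : List Int) (out : List Int × List Int × List Int) : Prop := out = get_subsets_rule_based_alt rule_predictions bert_predictions labels
instance (rule_predictions : List Int) (bert_predictions : List Int) (labels : List Int) (out : List Int × List Int × List Int) : Decidable (Spec_get_subsets_rule_based rule_predictions bert_predictions labels out) := by unfold Spec_get_subsets_rule_based; infer_instance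

-- ===== CLAIM (what is proved, stated in full; the proofs are below) =====
def Claim_equal_get_subsets_rule_based : Prop := ∀ (rule_predictions : List Int) (bert_predictions : List Int) (labels : List Int), Dom_get_subsets_rule_based rule_predictions bert_predictions labels → Spec_get_subsets_rule_based rule_predictions bert_predictions labels (get_subsets_rule_based rule_predictions bert_predictions labels)

-- ===== LEMMAS AND PROOFS =====

-- canonical recursive description of the filtered triple
def pvG : List Int → List Int → List Int → List Int × List Int × List Int
  | x :: xs, y :: ys, z :: zs =>
    let t := pvG xs ys zs
    if x ≠ 0 then (x :: t.1, y :: t.2.1, z :: t.2.2) else t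
  | _, _, _ => ([], [], [])

lemma foldA : ∀ (r b l a1 a2 a3 : List Int),
    (r.zip (b.zip l)).foldl
      (fun acc t =>
        if t.1 ≠ 0 then (acc.1 ++ [t.1], acc.2.1 ++ [t.2.1], acc.2.2 ++ [t.2.2])
        else acc)
      (a1, a2, a3)
    = (a1 ++ (pvG r b l).1, a2 ++ (pvG r b l).2.1, a3 ++ (pvG r b l).2.2) := by
  intro r
  induction r with
  | nil => intro b l a1 a2 a3; simp [pvG]
  | cons x xs ih =>
    intro b l a1 a2 a3
    cases b with
    | nil => simp [pvG]
    | cons y ys =>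
      cases l with
      | nil => simp [pvG]
      | cons z zs =>
        by_cases h : x = 0
        · simpa [pvG, h] using ih ys zs a1 a2 a3
        · simpa [pvG, h] using ih ys zs (a1 ++ [x]) (a2 ++ [y]) (a3 ++ [z])

lemma altG : ∀ (r b l : List Int), get_subsets_rule_based_alt r b l = pvG r b l := by
  intro r
  induction r with
  | nil => intro b l; simp [get_subsets_rule_based_alt, pvG]
  | cons x xs ih =>
    intro b l
    cases b with
    | nil => simp [get_subsets_rule_based_alt, pvG]
    | cons y ys =>
      cases l with
      | nil => simp [get_subsets_rule_based_alt, pvG]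
      | cons z zs =>
        by_cases h : x = 0
        · simp [get_subsets_rule_based_alt, pvG, ← ih ys zs, List.length_cons,
            List.range_succ_eq_map, List.filter_map, Function.comp_def, h,
            List.map_map, List.getElem?_cons_succ]
        · simp [get_subsets_rule_based_alt, pvG, ← ih ys zs, List.length_cons,
            List.range_succ_eq_map, List.filter_map, Function.comp_def, h,
            List.map_map, List.getElem?_cons_succ]

-- ===== VERDICT (by name: the statement is the Claim_ definition above) =====
theorem get_subsets_rule_based_spec : Claim_equal_get_subsets_rule_based := by
  intro r b l _
  unfold Spec_get_subsets_rule_based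
  rw [altG, get_subsets_rule_based, foldA]
  simp
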